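-- pv_equiv track=rewrite | github.com/XTerris/lct_hackaton | eval_submission.py | add_bio
-- ===== SOURCE A (Python) =====
-- def add_bio(pred):
--     res = []
--     seen = set()
--     for i in pred:
--         if i[2] == "O":
--             res.append(i)
--             continue
--         if i[2] in seen:
--             i = (i[0], i[1], "I-" + i[2])
--         else:
--             seen.add(i[2])
--             i = (i[0], i[1], "B-" + i[2])
--         res.append(i)
--     return res
-- ===== SOURCE B (Python) =====
-- def add_bio(pred):
--     first_idx = {}
--     for idx, i in enumerate(pred):
--         if i[2] != "O" and i[2] not in first_idx:
--             first_idx[i[2]] = idx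
--     res = []
--     for idx, i in enumerate(pred):
--         if i[2] == "O":
--             res.append(i)
--         elif idx == first_idx[i[2]]:
--             res.append((i[0], i[1], "B-" + i[2]))
--         else:
--             res.append((i[0], i[1], "I-" + i[2]))
--     return res
-- ===== Notes on version B (the rewrite author's own statement) =====
-- stated objective: alternative
-- what changed: Replaces the incrementally grown seen-set with a precomputed first-occurrence index table built in a separate first pass; the output pass branches on index equality with the table instead of set membership.
import Mathlib
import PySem

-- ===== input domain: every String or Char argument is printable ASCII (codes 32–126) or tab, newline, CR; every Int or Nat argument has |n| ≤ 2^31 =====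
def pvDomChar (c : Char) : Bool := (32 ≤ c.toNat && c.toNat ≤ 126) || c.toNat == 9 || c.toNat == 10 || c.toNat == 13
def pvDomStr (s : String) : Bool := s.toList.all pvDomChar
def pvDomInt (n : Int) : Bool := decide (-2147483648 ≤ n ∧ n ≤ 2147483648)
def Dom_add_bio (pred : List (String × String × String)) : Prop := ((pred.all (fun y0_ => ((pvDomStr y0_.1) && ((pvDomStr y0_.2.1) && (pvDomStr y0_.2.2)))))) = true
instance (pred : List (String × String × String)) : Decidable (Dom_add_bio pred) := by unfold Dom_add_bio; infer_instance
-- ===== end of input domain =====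

-- B replaces A's incrementally grown seen-set by a precomputed first-occurrence index
-- table and an index-equality branch (alternative decomposition, same output).

-- ===== PORT A =====
-- A's loop: res accumulator plus a growing set of tags already seen.
def addBioLoopA : List (String × String × String) → List (String × String × String) →
    PySem.Set String → List (String × String × String)
  | [], res, _ => res
  | i :: rest, res, seen =>
    if i.2.2 = "O" then addBioLoopA rest (res ++ [i]) seen
    else if i.2.2 ∈ seen then addBioLoopA rest (res ++ [(i.1, i.2.1, "I-" ++ i.2.2)]) seen
    else addBioLoopA rest (res ++ [(i.1, i.2.1, "B-" ++ i.2.2)]) (PySem.Set.add seen i.2.2)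

def add_bio (pred : List (String × String × String)) : List (String × String × String) :=
  addBioLoopA pred [] PySem.Set.empty

-- ===== PORT B =====
-- first pass: 'for idx, i in enumerate(pred): if i[2] != "O" and i[2] not in first_idx: first_idx[i[2]] = idx'
def addBioBuildFirst : List (String × String × String) → Nat → PySem.Dict String Nat →
    PySem.Dict String Nat
  | [], _, d => d
  | i :: rest, idx, d =>
    addBioBuildFirst rest (idx + 1)
      (if i.2.2 ≠ "O" ∧ d.get? i.2.2 = none then d.insert i.2.2 idx else d)

-- second pass: Python's 'first_idx[i[2]]' always succeeds (the tag occurs at this very index),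
-- so getD's default 0 is never used.
def addBioLoopB : List (String × String × String) → Nat → PySem.Dict String Nat →
    List (String × String × String) → List (String × String × String)
  | [], _, _, res => res
  | i :: rest, idx, fd, res =>
    if i.2.2 = "O" then addBioLoopB rest (idx + 1) fd (res ++ [i])
    else if idx = fd.getD i.2.2 0 then
      addBioLoopB rest (idx + 1) fd (res ++ [(i.1, i.2.1, "B-" ++ i.2.2)])
    else addBioLoopB rest (idx + 1) fd (res ++ [(i.1, i.2.1, "I-" ++ i.2.2)])

def add_bio_alt (pred : List (String × String × String)) : List (String × String × String) :=
  addBioLoopB pred 0 (addBioBuildFirst pred 0 PySem.Dict.empty) []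

-- ===== PRECONDITION & SPEC =====
def Spec_add_bio (pred : List (String × String × String)) (out : List (String × String × String)) : Prop := out = add_bio_alt pred
instance (pred : List (String × String × String)) (out : List (String × String × String)) : Decidable (Spec_add_bio pred out) := by unfold Spec_add_bio; infer_instance

-- ===== CLAIM (what is proved, stated in full; the proofs are below) =====
def Claim_equal_add_bio : Prop := ∀ (pred : List (String × String × String)), Dom_add_bio pred → Spec_add_bio pred (add_bio pred)

-- ===== LEMMAS AND PROOFS =====

-- the table built by the first pass maps t (≠ "O") to the index of its first occurrence
lemma addBioBuildFirst_get (l : List (String × String × String)) :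
    ∀ (n : Nat) (d : PySem.Dict String Nat) (t : String), t ≠ "O" →
    (addBioBuildFirst l n d).get? t =
      (d.get? t).or ((List.findIdx? (fun i => i.2.2 == t) l).map (· + n)) := by
  induction l with
  | nil => intro n d t _; simp [addBioBuildFirst]
  | cons i rest ih =>
    intro n d t ht
    simp only [addBioBuildFirst]
    by_cases hc : i.2.2 ≠ "O" ∧ d.get? i.2.2 = none
    · rw [if_pos hc, ih _ _ _ ht, PySem.Dict.get?_insert]
      by_cases hti : t = i.2.2
      · subst hti
        rw [if_pos rfl, List.findIdx?_cons]
        simp [hc.2]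
      · rw [if_neg hti, List.findIdx?_cons]
        have : (i.2.2 == t) = false := by
          simp [Ne.symm hti]
        rw [this]
        cases h : List.findIdx? (fun i => i.2.2 == t) rest with
        | none => simp
        | some k =>
          have e : k + 1 + n = k + (n + 1) := by omega
          simp [e]
    · rw [if_neg hc, ih _ _ _ ht, List.findIdx?_cons]
      by_cases hti : (i.2.2 == t) = true
      · have hte : i.2.2 = t := by simpa using hti
        have hO : i.2.2 ≠ "O" := hte ▸ ht
        have hsome : d.get? i.2.2 ≠ none := by tauto
        rw [hti]
        cases h : d.get? t with
        | none => exact absurd (hte ▸ h) hsome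
        | some v => simp
      · rw [if_neg hti]
        cases h : List.findIdx? (fun i => i.2.2 == t) rest with
        | none => simp
        | some k =>
          have e : k + 1 + n = k + (n + 1) := by omega
          simp [e]

lemma addBio_loops_eq (pred : List (String × String × String)) :
    ∀ (l p : List (String × String × String)) (seen : PySem.Set String)
      (res : List (String × String × String)),
    pred = p ++ l →
    (∀ t : String, t ≠ "O" → (t ∈ seen ↔ p.any (fun i => i.2.2 == t) = true)) →
    addBioLoopB l p.length (addBioBuildFirst pred 0 PySem.Dict.empty) res
      = addBioLoopA l res seen := by
  intro l
  induction l with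
  | nil => intro p seen res _ _; rfl
  | cons i rest ih =>
    intro p seen res hp hseen
    simp only [addBioLoopA, addBioLoopB]
    by_cases hO : i.2.2 = "O"
    · rw [if_pos hO, if_pos hO]
      have h1 : pred = (p ++ [i]) ++ rest := by simp [hp]
      have := ih (p ++ [i]) seen (res ++ [i]) h1 (by
        intro t ht
        rw [hseen t ht]
        simp [hO, Ne.symm ht])
      simpa using this
    · rw [if_neg hO, if_neg hO]
      have hget : (addBioBuildFirst pred 0 PySem.Dict.empty).get? i.2.2 =
          (List.findIdx? (fun j => j.2.2 == i.2.2) p).or (some p.length) := by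
        rw [addBioBuildFirst_get pred 0 PySem.Dict.empty i.2.2 hO, hp,
          List.findIdx?_append, List.findIdx?_cons]
        simp
      have h1 : pred = (p ++ [i]) ++ rest := by simp [hp]
      by_cases hmem : i.2.2 ∈ seen
      · have hany : p.any (fun j => j.2.2 == i.2.2) = true := (hseen _ hO).mp hmem
        obtain ⟨k, hk⟩ : ∃ k, List.findIdx? (fun j => j.2.2 == i.2.2) p = some k := by
          have := (@List.findIdx?_isSome _ p (fun j => j.2.2 == i.2.2)).trans hany
          cases h : List.findIdx? (fun j => j.2.2 == i.2.2) p
          · rw [h] at this; simp at this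
          · exact ⟨_, rfl⟩
        have hklt : k < p.length :=
          (List.findIdx?_eq_some_iff_findIdx_eq.mp hk).1
        have hgd : (addBioBuildFirst pred 0 PySem.Dict.empty).getD i.2.2 0 = k := by
          rw [PySem.Dict.getD_eq_get?_getD, hget, hk]; rfl
        rw [hgd, if_neg (by omega), if_pos hmem]
        have := ih (p ++ [i]) seen (res ++ [(i.1, i.2.1, "I-" ++ i.2.2)]) h1 (by
          intro t ht
          rw [hseen t ht]
          constructor
          · intro h; simp [List.any_append, h]
          · intro h
            rcases (by simpa [List.any_append] using h : p.any (fun j => j.2.2 == t) = true ∨ i.2.2 = t) with h' | h'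
            · exact h'
            · exact h' ▸ hany)
        simpa using this
      · have hany : p.any (fun j => j.2.2 == i.2.2) = false := by
          rw [← Bool.not_eq_true]; exact fun h => hmem ((hseen _ hO).mpr h)
        have hnone : List.findIdx? (fun j => j.2.2 == i.2.2) p = none := by
          have := (@List.findIdx?_isSome _ p (fun j => j.2.2 == i.2.2)).trans hany
          cases h : List.findIdx? (fun j => j.2.2 == i.2.2) p
          · rfl
          · rw [h] at this; simp at this
        have hgd : (addBioBuildFirst pred 0 PySem.Dict.empty).getD i.2.2 0 = p.length := by
          rw [PySem.Dict.getD_eq_get?_getD, hget, hnone]; rfl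
        rw [hgd, if_pos rfl, if_neg hmem]
        have := ih (p ++ [i]) (PySem.Set.add seen i.2.2)
            (res ++ [(i.1, i.2.1, "B-" ++ i.2.2)]) h1 (by
          intro t ht
          rw [PySem.Set.mem_add, hseen t ht, List.any_append]
          by_cases hti : i.2.2 = t
          · simp [hti]
          · simp only [List.any_cons, List.any_nil]
            constructor
            · rintro (h | h)
              · simp [h]
              · exact absurd h.symm hti
            · intro h
              rcases (by simpa using h : p.any (fun j => j.2.2 == t) = true ∨ i.2.2 = t) with h' | h'
              · exact Or.inl h'
              · exact absurd h' hti)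
        simpa using this

-- ===== VERDICT (by name: the statement is the Claim_ definition above) =====
theorem add_bio_spec : Claim_equal_add_bio := by
  intro pred _
  unfold Spec_add_bio add_bio add_bio_alt
  have := addBio_loops_eq pred pred [] PySem.Set.empty [] (by simp) (by simp [PySem.Set.empty])
  exact this.symm
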